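-- pv_equiv track=rewrite | github.com/benjaminhollbach6-glitch/zetafoundry | app/nlu/sanitize.py | fts_match_string
-- ===== SOURCE A (Python) =====
-- import unicodedata as _ud
--
-- def _norm(s: str) -> str:
--     s = _ud.normalize("NFKC", s).casefold()
--     out, last_space = [], True
--     for ch in s:
--         if ch.isalnum() or ch == "_":
--             out.append(ch); last_space = False
--         else:
--             if not last_space:
--                 out.append(" "); last_space = True
--     return "".join(out).strip()
--
-- def tokens(s: str, minlen: int = 1) -> list[str]:
--     base = _norm(s)
--     seen, uniq = set(), []
--     for t in base.split():
--         if len(t) >= minlen and t not in seen: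
--             uniq.append(t); seen.add(t)
--     return uniq
--
-- def fts_match_string(s: str) -> str:
--     toks = tokens(s)
--     if not toks:
--         return ""
--     parts = []
--     for t in toks:
--         t = t.replace('"', '')
--         parts.append(f'"{t}*"' if len(t) >= 3 else f'"{t}"')
--     return " OR ".join(parts)
-- ===== SOURCE B (Python) =====
-- import unicodedata as _ud
--
-- def fts_match_string(s: str) -> str:
--     s = _ud.normalize("NFKC", s).casefold()
--     seen = set()
--     parts = []
--     buf = []
--     for ch in s + " ":  # trailing sentinel flushes the last token
--         if ch.isalnum() or ch == "_":
--             buf.append(ch)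
--         elif buf:
--             t = "".join(buf)
--             buf = []
--             if t not in seen:
--                 seen.add(t)
--                 parts.append(f'"{t}*"' if len(t) >= 3 else f'"{t}"')
--     return " OR ".join(parts)
-- ===== Notes on version B (the rewrite author's own statement) =====
-- stated objective: simpler
-- what changed: B drops A's three-stage pipeline (build a space-normalized intermediate string, re-scan it with split(), then dedup, then a third loop stripping quotes and formatting) and instead tokenizes, dedups and formats in one single character walk with a token buffer; the quote-stripping replace disappears because token characters can never be quotes.
import Mathlib
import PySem

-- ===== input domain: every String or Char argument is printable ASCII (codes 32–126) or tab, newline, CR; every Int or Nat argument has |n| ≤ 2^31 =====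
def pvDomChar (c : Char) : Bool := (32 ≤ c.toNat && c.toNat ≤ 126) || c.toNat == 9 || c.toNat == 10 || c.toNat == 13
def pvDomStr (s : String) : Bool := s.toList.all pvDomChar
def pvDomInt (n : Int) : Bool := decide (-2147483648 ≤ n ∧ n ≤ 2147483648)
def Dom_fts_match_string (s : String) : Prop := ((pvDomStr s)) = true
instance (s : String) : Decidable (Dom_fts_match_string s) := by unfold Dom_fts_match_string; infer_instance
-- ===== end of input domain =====

-- B fuses A's normalize-to-spaced-string + split + dedup pipeline into one character walk (objective: simpler).

-- shared token-character predicate: the expression `ch.isalnum() or ch == "_"` appearing verbatim in both Pythons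
def pvTok (c : Char) : Bool := PySem.Chars.isalnum c || c == '_'

-- ===== PORT A =====
-- exact on the ASCII domain: NFKC normalization is the identity and casefold = lower there
def pvNormGo : List Char → List Char → Bool → List Char
  | [], out, _ => out
  | c :: rest, out, lastSpace =>
    if pvTok c then pvNormGo rest (out ++ [c]) false
    else if !lastSpace then pvNormGo rest (out ++ [' ']) true
    else pvNormGo rest out lastSpace

def pvNorm (s : List Char) : List Char :=
  PySem.Chars.strip (pvNormGo (PySem.Chars.lower s) [] true)

def pvTokensGo : List (List Char) → PySem.Set (List Char) → List (List Char) → Int → List (List Char)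
  | [], _, uniq, _ => uniq
  | t :: ts, seen, uniq, minlen =>
    if minlen ≤ (t.length : Int) ∧ ¬ seen.contains t then
      pvTokensGo ts (PySem.Set.add seen t) (uniq ++ [t]) minlen
    else pvTokensGo ts seen uniq minlen

def pvTokens (s : List Char) (minlen : Int) : List (List Char) :=
  pvTokensGo (PySem.Chars.split₀ (pvNorm s)) PySem.Set.empty [] minlen

def pvPartsGo : List (List Char) → List (List Char) → List (List Char)
  | [], parts => parts
  | t :: ts, parts =>
    let t' := PySem.Chars.replace t ['"'] []
    pvPartsGo ts (parts ++ [if 3 ≤ t'.length then '"' :: t' ++ ['*', '"'] else '"' :: t' ++ ['"']])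

def fts_match_string (s : String) : String :=
  let toks := pvTokens s.toList 1
  if toks = [] then ""
  else String.ofList (PySem.Chars.join (' ' :: 'O' :: 'R' :: [' ']) (pvPartsGo toks []))

-- ===== PORT B =====
-- exact on the ASCII domain: NFKC normalization is the identity and casefold = lower there
def pvScanGo : List Char → List Char → PySem.Set (List Char) → List (List Char) → List (List Char)
  | [], _, _, parts => parts
  | c :: rest, buf, seen, parts =>
    if pvTok c then pvScanGo rest (buf ++ [c]) seen parts
    else if buf ≠ [] then
      (if seen.contains buf then pvScanGo rest [] seen parts
       else pvScanGo rest [] (PySem.Set.add seen buf)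
         (parts ++ [if 3 ≤ buf.length then '"' :: buf ++ ['*', '"'] else '"' :: buf ++ ['"']]))
    else pvScanGo rest buf seen parts

def fts_match_string_alt (s : String) : String :=
  String.ofList (PySem.Chars.join (' ' :: 'O' :: 'R' :: [' '])
    (pvScanGo (PySem.Chars.lower s.toList ++ [' ']) [] PySem.Set.empty []))

-- ===== PRECONDITION & SPEC =====
def Spec_fts_match_string (s : String) (out : String) : Prop := out = fts_match_string_alt s
instance (s : String) (out : String) : Decidable (Spec_fts_match_string s out) := by unfold Spec_fts_match_string; infer_instance

-- ===== CLAIM (what is proved, stated in full; the proofs are below) =====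
def Claim_equal_fts_match_string : Prop := ∀ (s : String), Dom_fts_match_string s → Spec_fts_match_string s (fts_match_string s)

-- ===== LEMMAS AND PROOFS =====

-- proof-side vocabulary
def pvWsplit : List Char → List Char → List (List Char)
  | buf, [] => if buf = [] then [] else [buf]
  | buf, c :: rest =>
    if PySem.Chars.isspace c then
      (if buf = [] then pvWsplit [] rest else buf :: pvWsplit [] rest)
    else pvWsplit (buf ++ [c]) rest

def pvNorm' : List Char → Bool → List Char
  | [], _ => []
  | c :: rest, b =>
    if pvTok c then c :: pvNorm' rest false
    else if !b then ' ' :: pvNorm' rest true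
    else pvNorm' rest b

def pvTB : List Char → List Char → List (List Char)
  | buf, [] => if buf = [] then [] else [buf]
  | buf, c :: rest =>
    if pvTok c then pvTB (buf ++ [c]) rest
    else if buf = [] then pvTB [] rest
    else buf :: pvTB [] rest

def pvPart (t : List Char) : List Char :=
  if 3 ≤ t.length then '"' :: t ++ ['*', '"'] else '"' :: t ++ ['"']

def pvEmit : PySem.Set (List Char) → List (List Char) → List (List Char)
  | _, [] => []
  | seen, t :: ts =>
    if seen.contains t then pvEmit seen ts
    else pvPart t :: pvEmit (PySem.Set.add seen t) ts

def pvDedup : PySem.Set (List Char) → List (List Char) → List (List Char)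
  | _, [] => []
  | seen, t :: ts =>
    if seen.contains t then pvDedup seen ts
    else t :: pvDedup (PySem.Set.add seen t) ts

lemma pvNormGo_eq (cs : List Char) : ∀ out b, pvNormGo cs out b = out ++ pvNorm' cs b := by
  induction cs with
  | nil => intro out b; simp [pvNormGo, pvNorm']
  | cons c rest ih => intro out b; simp [pvNormGo, pvNorm']; split_ifs <;> simp [ih]

lemma tok_not_space (c : Char) (h : pvTok c = true) : PySem.Chars.isspace c = false := by
  simp [pvTok, PySem.Chars.isalnum, PySem.Chars.isalpha, PySem.Chars.isdigit,
    PySem.Chars.isupper, PySem.Chars.islower, Char.le_def,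
    UInt32.le_iff_toNat_le, beq_iff_eq] at h
  simp [PySem.Chars.isspace]
  have e : c.toNat = c.val.toNat := rfl
  rcases h with ((h | h) | h) | h
  · omega
  · omega
  · omega
  · subst h; decide

lemma split₀_go_eq (s : List Char) : ∀ cur acc,
    PySem.Chars.split₀.go s cur acc = acc.reverse ++ pvWsplit cur.reverse s := by
  induction s with
  | nil =>
    intro cur acc
    simp [PySem.Chars.split₀.go, pvWsplit]
    split_ifs with h
    · simp_all
    · simp_all
  | cons c rest ih =>
    intro cur acc
    simp only [PySem.Chars.split₀.go, pvWsplit]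
    split_ifs with h1 h2 h3 h3
    · simp_all [List.isEmpty_iff]
    · simp_all [List.isEmpty_iff]
    · simp_all [List.isEmpty_iff]
    · simp_all [List.isEmpty_iff]
    · rw [ih]; simp

lemma split₀_eq (s : List Char) : PySem.Chars.split₀ s = pvWsplit [] s := by
  simpa using split₀_go_eq s [] []

lemma pvWsplit_spaces (t : List Char) (h : ∀ c ∈ t, PySem.Chars.isspace c = true) :
    ∀ buf, pvWsplit buf t = if buf = [] then [] else [buf] := by
  induction t with
  | nil => intro buf; simp [pvWsplit]
  | cons c rest ih =>
    intro buf
    have hc := h c (by simp)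
    have hrest : ∀ c ∈ rest, PySem.Chars.isspace c = true := fun x hx => h x (by simp [hx])
    simp [pvWsplit, hc]
    split_ifs with hb <;> simp [ih hrest]

lemma pvWsplit_append_spaces (t : List Char) (h : ∀ c ∈ t, PySem.Chars.isspace c = true) :
    ∀ x buf, pvWsplit buf (x ++ t) = pvWsplit buf x := by
  intro x
  induction x with
  | nil => intro buf; rw [List.nil_append, pvWsplit_spaces t h buf]; cases buf <;> simp [pvWsplit]
  | cons c rest ih =>
    intro buf
    simp only [List.cons_append, pvWsplit]
    split_ifs <;> simp [ih]

lemma pvWsplit_lstrip (x : List Char) :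
    pvWsplit [] (List.dropWhile PySem.Chars.isspace x) = pvWsplit [] x := by
  induction x with
  | nil => rfl
  | cons c rest ih =>
    by_cases hc : PySem.Chars.isspace c
    · simp [hc, pvWsplit, ih]
    · simp [List.dropWhile, hc]

lemma pvWsplit_strip (x : List Char) :
    pvWsplit [] (PySem.Chars.strip x) = pvWsplit [] x := by
  unfold PySem.Chars.strip PySem.Chars.rstrip PySem.Chars.lstrip
  set y := List.dropWhile PySem.Chars.isspace x with hy
  have hdecomp : y = (List.dropWhile PySem.Chars.isspace y.reverse).reverse
      ++ (List.takeWhile PySem.Chars.isspace y.reverse).reverse := by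
    have h0 := List.takeWhile_append_dropWhile (p := PySem.Chars.isspace) (l := y.reverse)
    calc y = (y.reverse).reverse := (List.reverse_reverse y).symm
      _ = (List.takeWhile PySem.Chars.isspace y.reverse
            ++ List.dropWhile PySem.Chars.isspace y.reverse).reverse := by rw [h0]
      _ = (List.dropWhile PySem.Chars.isspace y.reverse).reverse
            ++ (List.takeWhile PySem.Chars.isspace y.reverse).reverse := List.reverse_append
  have hsp : ∀ c ∈ (List.takeWhile PySem.Chars.isspace y.reverse).reverse,
      PySem.Chars.isspace c = true := by
    intro c hc
    exact List.mem_takeWhile_imp (by simpa using hc)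
  calc pvWsplit [] (List.dropWhile PySem.Chars.isspace y.reverse).reverse
      = pvWsplit [] ((List.dropWhile PySem.Chars.isspace y.reverse).reverse
          ++ (List.takeWhile PySem.Chars.isspace y.reverse).reverse) := by
        rw [pvWsplit_append_spaces _ hsp]
    _ = pvWsplit [] y := by rw [← hdecomp]
    _ = pvWsplit [] x := pvWsplit_lstrip x

lemma space_is_space : PySem.Chars.isspace ' ' = true := by decide

lemma pvWsplit_norm' (cs : List Char) :
    pvWsplit [] (pvNorm' cs true) = pvTB [] cs ∧
    ∀ buf, pvWsplit buf (pvNorm' cs false) = pvTB buf cs := by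
  induction cs with
  | nil => constructor <;> intros <;> simp [pvNorm', pvWsplit, pvTB]
  | cons c rest ih =>
    by_cases hc : pvTok c = true
    · have hns := tok_not_space c hc
      constructor
      · simp [pvNorm', pvTB, hc, pvWsplit, hns, ih.2]
      · intro buf; simp [pvNorm', pvTB, hc, pvWsplit, hns, ih.2]
    · constructor
      · simp [pvNorm', pvTB, hc, ih.1]
      · intro buf
        by_cases hb : buf = []
        · subst hb; simp [pvNorm', pvTB, hc, pvWsplit, space_is_space, ih.1]
        · simp [pvNorm', pvTB, hc, hb, pvWsplit, space_is_space, ih.1]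

lemma pvTB_mem (cs : List Char) : ∀ buf, (∀ c ∈ buf, pvTok c = true) →
    ∀ t ∈ pvTB buf cs, t ≠ [] ∧ ∀ c ∈ t, pvTok c = true := by
  induction cs with
  | nil =>
    intro buf hbuf t ht
    simp only [pvTB] at ht
    split_ifs at ht with hb
    · simp at ht
    · simp at ht; subst ht; exact ⟨hb, hbuf⟩
  | cons c rest ih =>
    intro buf hbuf t ht
    simp only [pvTB] at ht
    split_ifs at ht with hc hb
    · refine ih (buf ++ [c]) ?_ t ht
      intro x hx
      rcases List.mem_append.1 hx with hx | hx
      · exact hbuf x hx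
      · simp at hx; subst hx; exact hc
    · exact ih [] (by simp) t ht
    · rcases List.mem_cons.1 ht with ht | ht
      · subst ht; exact ⟨hb, hbuf⟩
      · exact ih [] (by simp) t ht

lemma pvTokensGo_eq (toks : List (List Char)) (hne : ∀ t ∈ toks, t ≠ []) :
    ∀ seen uniq, pvTokensGo toks seen uniq 1 = uniq ++ pvDedup seen toks := by
  induction toks with
  | nil => intro seen uniq; simp [pvTokensGo, pvDedup]
  | cons t ts ih =>
    intro seen uniq
    have h1 : (1 : Int) ≤ (t.length : Int) := by
      have := hne t (by simp)
      have : t.length ≠ 0 := by simpa [List.length_eq_zero_iff] using this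
      omega
    have hts : ∀ x ∈ ts, x ≠ [] := fun x hx => hne x (by simp [hx])
    simp only [pvTokensGo, pvDedup, h1, true_and]
    by_cases hm : t ∈ (seen : List (List Char))
    · simp [hm, ih hts]
    · simp [hm, ih hts]

lemma replace_go_id (fuel : Nat) : ∀ (l acc : List Char), ('"' : Char) ∉ l →
    PySem.Chars.replace.go ['"'] [] fuel l acc = acc.reverse ++ l := by
  induction fuel with
  | zero => intro l acc _; simp [PySem.Chars.replace.go]
  | succ n ih =>
    intro l acc h
    cases l with
    | nil => simp [PySem.Chars.replace.go]
    | cons c t =>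
      have hc : c ≠ '"' := by intro hh; exact h (by simp [hh])
      have hpre : List.isPrefixOf ['"'] (c :: t) = false := by
        simp [List.isPrefixOf, hc.symm]
      simp only [PySem.Chars.replace.go, hpre, Bool.false_eq_true, if_false]
      rw [ih t (c :: acc) (fun hh => h (by simp [hh]))]
      simp

lemma replace_id (t : List Char) (h : ('"' : Char) ∉ t) :
    PySem.Chars.replace t ['"'] [] = t := by
  simp only [PySem.Chars.replace, List.isEmpty_cons, Bool.false_eq_true, if_false]
  simpa using replace_go_id t.length t [] h

lemma pvPartsGo_eq (L : List (List Char)) : ∀ parts,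
    pvPartsGo L parts = parts ++ L.map (fun t => pvPart (PySem.Chars.replace t ['"'] [])) := by
  induction L with
  | nil => intro parts; simp [pvPartsGo]
  | cons t ts ih => intro parts; simp [pvPartsGo, pvPart, ih]

lemma map_dedup (toks : List (List Char)) (h : ∀ t ∈ toks, ('"' : Char) ∉ t) :
    ∀ seen, (pvDedup seen toks).map (fun t => pvPart (PySem.Chars.replace t ['"'] []))
      = pvEmit seen toks := by
  induction toks with
  | nil => intro seen; simp [pvDedup, pvEmit]
  | cons t ts ih =>
    intro seen
    have hts : ∀ x ∈ ts, ('"' : Char) ∉ x := fun x hx => h x (by simp [hx])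
    by_cases hm : t ∈ (seen : List (List Char))
    · simp [pvDedup, pvEmit, hm, ih hts]
    · simp [pvDedup, pvEmit, hm, ih hts, replace_id t (h t (by simp))]

lemma pvScanGo_eq (cs : List Char) : ∀ buf seen parts,
    pvScanGo (cs ++ [' ']) buf seen parts = parts ++ pvEmit seen (pvTB buf cs) := by
  induction cs with
  | nil =>
    intro buf seen parts
    have hsp : pvTok ' ' = false := by decide
    cases buf with
    | nil => simp [pvScanGo, hsp, pvTB, pvEmit]
    | cons b bs =>
      have hTB : pvTB (b :: bs) ([] : List Char) = [b :: bs] := by simp [pvTB]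
      simp only [List.nil_append, pvScanGo, hsp, Bool.false_eq_true, if_false, ne_eq,
        reduceCtorEq, not_false_eq_true, if_true, hTB]
      by_cases hm2 : (b :: bs) ∈ (seen : List (List Char))
      · simp [hm2, pvEmit]
      · simp [hm2, pvEmit, pvPart]
  | cons c rest ih =>
    intro buf seen parts
    by_cases hc : pvTok c = true
    · simp [pvScanGo, hc, pvTB, ih]
    · cases buf with
      | nil => simp [pvScanGo, hc, pvTB, ih]
      | cons b bs =>
        simp only [List.cons_append, pvScanGo, hc, Bool.false_eq_true, if_false,
          ne_eq, reduceCtorEq, not_false_eq_true, if_true, pvTB, if_false]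
        simp only [pvEmit, pvPart]
        split_ifs with hm <;> simp [ih]

lemma main_eq (s : String) :
    pvScanGo (PySem.Chars.lower s.toList ++ [' ']) [] PySem.Set.empty []
      = pvPartsGo (pvTokens s.toList 1) [] := by
  set ls := PySem.Chars.lower s.toList with hls
  have hT := pvTB_mem ls [] (by simp)
  have hne : ∀ t ∈ pvTB [] ls, t ≠ [] := fun t ht => (hT t ht).1
  have hq : ∀ t ∈ pvTB [] ls, ('"' : Char) ∉ t := by
    intro t ht hmem
    have := (hT t ht).2 '"' hmem
    simp [pvTok, PySem.Chars.isalnum, PySem.Chars.isalpha, PySem.Chars.isdigit,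
      PySem.Chars.isupper, PySem.Chars.islower] at this
  have htoks : pvTokens s.toList 1 = pvDedup PySem.Set.empty (pvTB [] ls) := by
    unfold pvTokens pvNorm
    rw [split₀_eq, pvWsplit_strip, pvNormGo_eq, List.nil_append,
      (pvWsplit_norm' ls).1, pvTokensGo_eq _ hne, List.nil_append]
  rw [pvScanGo_eq, htoks, pvPartsGo_eq, map_dedup _ hq, List.nil_append]

-- ===== VERDICT (by name: the statement is the Claim_ definition above) =====
theorem fts_match_string_spec : Claim_equal_fts_match_string := by
  intro s _
  unfold Spec_fts_match_string fts_match_string fts_match_string_alt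
  rw [main_eq]
  by_cases h : pvTokens s.toList 1 = []
  · simp [h, pvPartsGo, PySem.Chars.join]
    rfl
  · simp [h]
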